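-- pv_equiv track=rewrite | github.com/lucasiscovici2/kata-pre-commit | kata/src/calculations.py | calculations
-- ===== SOURCE A (Python) =====
-- from typing import List, Tuple
--
-- def calculations(a: int, b: int, c: int, d: bool) -> List[float]:
--     res: List[float] = []
--     if a < b**2:
--         if b > c**2:
--             if d == True:
--                 for i in range(b):
--                     for j in range(a):
--                         for j in range(a**2):
--                             res.append(1 if b + c > a + c * 2 else 2)
--             elif not d and b - c**2 > a:
--                 for i in range(b):
--                     for j in range(a):
--                         for j in range(a**2):
--                             res.append(2 if b + c > a + c * 2 else 3)
--             else:
--                 for i in range(b):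
--                     for j in range(a):
--                         res.append(6 if b * c > a * c * 2 else 0)
--         else:
--             if d:
--                 for i in range(b):
--                     for j in range(a):
--                         res.append(b**2)
--             else:
--                 for i in range(b):
--                     for j in range(a):
--                         res.append(b * c**2)
--     else:
--         for i in range(b):
--             for j in range(a):
--                 res.append(b**2 if d else a**2)
--     return res
-- ===== SOURCE B (Python) =====
-- def calculations(a, b, c, d):
--     if a < b**2:
--         if b > c**2:
--             if d:
--                 v, n = (1 if b + c > a + c * 2 else 2), max(0, b) * max(0, a) * a**2
--             elif b - c**2 > a:
--                 v, n = (2 if b + c > a + c * 2 else 3), max(0, b) * max(0, a) * a**2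
--             else:
--                 v, n = (6 if b * c > a * c * 2 else 0), max(0, b) * max(0, a)
--         elif d:
--             v, n = b**2, max(0, b) * max(0, a)
--         else:
--             v, n = b * c**2, max(0, b) * max(0, a)
--     else:
--         v, n = (b**2 if d else a**2), max(0, b) * max(0, a)
--     return [v] * n
-- ===== Notes on version B (the rewrite author's own statement) =====
-- stated objective: simpler
-- what changed: Replaces all nested append loops with a closed form: each leaf computes the constant value once and the number of copies as a product of range lengths (max(0,b)*max(0,a)*a**2 or max(0,b)*max(0,a)) and returns [v]*n.
import Mathlib
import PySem

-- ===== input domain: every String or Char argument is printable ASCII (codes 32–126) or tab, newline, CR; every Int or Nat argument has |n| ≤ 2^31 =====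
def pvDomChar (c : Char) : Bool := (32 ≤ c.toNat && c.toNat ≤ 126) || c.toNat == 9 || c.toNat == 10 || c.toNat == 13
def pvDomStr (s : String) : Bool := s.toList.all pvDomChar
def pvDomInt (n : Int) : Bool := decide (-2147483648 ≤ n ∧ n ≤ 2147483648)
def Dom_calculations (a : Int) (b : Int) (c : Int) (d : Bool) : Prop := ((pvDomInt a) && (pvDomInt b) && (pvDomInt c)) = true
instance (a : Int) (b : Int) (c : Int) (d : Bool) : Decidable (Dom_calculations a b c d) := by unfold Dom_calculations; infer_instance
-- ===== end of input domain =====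

-- B replaces A's nested append loops by computing, per branch, the constant value and a
-- closed-form copy count (product of range lengths), returning one list replication.

-- ===== PORT A =====
def calculations (a : Int) (b : Int) (c : Int) (d : Bool) : List Int :=
  let res : List Int := []
  if a < b ^ 2 then
    if b > c ^ 2 then
      if d = true then
        (PySem.List.pyRange 0 b 1).foldl (fun res _ =>
          (PySem.List.pyRange 0 a 1).foldl (fun res _ =>
            (PySem.List.pyRange 0 (a ^ 2) 1).foldl (fun res _ =>
              res ++ [if b + c > a + c * 2 then 1 else 2]) res) res) res
      else if ¬(d = true) ∧ b - c ^ 2 > a then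
        (PySem.List.pyRange 0 b 1).foldl (fun res _ =>
          (PySem.List.pyRange 0 a 1).foldl (fun res _ =>
            (PySem.List.pyRange 0 (a ^ 2) 1).foldl (fun res _ =>
              res ++ [if b + c > a + c * 2 then 2 else 3]) res) res) res
      else
        (PySem.List.pyRange 0 b 1).foldl (fun res _ =>
          (PySem.List.pyRange 0 a 1).foldl (fun res _ =>
            res ++ [if b * c > a * c * 2 then 6 else 0]) res) res
    else
      if d = true then
        (PySem.List.pyRange 0 b 1).foldl (fun res _ =>
          (PySem.List.pyRange 0 a 1).foldl (fun res _ =>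
            res ++ [b ^ 2]) res) res
      else
        (PySem.List.pyRange 0 b 1).foldl (fun res _ =>
          (PySem.List.pyRange 0 a 1).foldl (fun res _ =>
            res ++ [b * c ^ 2]) res) res
  else
    (PySem.List.pyRange 0 b 1).foldl (fun res _ =>
      (PySem.List.pyRange 0 a 1).foldl (fun res _ =>
        res ++ [if d = true then b ^ 2 else a ^ 2]) res) res

-- ===== PORT B =====
def calculations_alt (a : Int) (b : Int) (c : Int) (d : Bool) : List Int :=
  let vn : Int × Int :=
    if a < b ^ 2 then
      if b > c ^ 2 then
        if d = true then
          ((if b + c > a + c * 2 then 1 else 2), max 0 b * max 0 a * a ^ 2)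
        else if b - c ^ 2 > a then
          ((if b + c > a + c * 2 then 2 else 3), max 0 b * max 0 a * a ^ 2)
        else
          ((if b * c > a * c * 2 then 6 else 0), max 0 b * max 0 a)
      else if d = true then
        (b ^ 2, max 0 b * max 0 a)
      else
        (b * c ^ 2, max 0 b * max 0 a)
    else
      ((if d = true then b ^ 2 else a ^ 2), max 0 b * max 0 a)
  List.replicate vn.2.toNat vn.1

-- ===== PRECONDITION & SPEC =====
def Spec_calculations (a : Int) (b : Int) (c : Int) (d : Bool) (out : List Int) : Prop := out = calculations_alt a b c d
instance (a : Int) (b : Int) (c : Int) (d : Bool) (out : List Int) : Decidable (Spec_calculations a b c d out) := by unfold Spec_calculations; infer_instance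

-- ===== CLAIM (what is proved, stated in full; the proofs are below) =====
def Claim_equal_calculations : Prop := ∀ (a : Int) (b : Int) (c : Int) (d : Bool), Dom_calculations a b c d → Spec_calculations a b c d (calculations a b c d)

-- ===== LEMMAS AND PROOFS =====

lemma foldl_append_singleton (v : Int) :
    ∀ (l : List Int) (init : List Int),
      l.foldl (fun r _ => r ++ [v]) init = init ++ List.replicate l.length v := by
  intro l
  induction l with
  | nil => simp
  | cons x xs ih =>
    intro init
    simp [List.foldl_cons, ih, List.replicate_succ]

lemma foldl_append_const (t : List Int) :
    ∀ (l : List Int) (init : List Int),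
      l.foldl (fun r _ => r ++ t) init = init ++ (List.replicate l.length t).flatten := by
  intro l
  induction l with
  | nil => simp
  | cons x xs ih =>
    intro init
    simp [List.foldl_cons, ih, List.replicate_succ]

lemma flatten_replicate_replicate (m k : Nat) (v : Int) :
    (List.replicate m (List.replicate k v)).flatten = List.replicate (m * k) v := by
  induction m with
  | zero => simp
  | succ n ih =>
    rw [List.replicate_succ, List.flatten_cons, ih, List.replicate_append_replicate,
      Nat.succ_mul, Nat.add_comm]

lemma toNat_double (a b : Int) : (max 0 b * max 0 a).toNat = b.toNat * a.toNat := by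
  rcases le_total b 0 with hb | hb
  · rw [max_eq_left hb, Int.toNat_of_nonpos hb]; simp
  · rcases le_total a 0 with ha | ha
    · rw [max_eq_right hb, max_eq_left ha, Int.toNat_of_nonpos ha]; simp
    · rw [max_eq_right hb, max_eq_right ha, Int.toNat_mul hb ha]

lemma toNat_triple (a b : Int) :
    (max 0 b * max 0 a * a ^ 2).toNat = b.toNat * (a.toNat * (a ^ 2).toNat) := by
  rw [Int.toNat_mul (by positivity) (by positivity), toNat_double, Nat.mul_assoc]

lemma double_loop (v b a : Int) :
    (PySem.List.pyRange 0 b 1).foldl (fun r _ =>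
      (PySem.List.pyRange 0 a 1).foldl (fun r _ => r ++ [v]) r) ([] : List Int)
    = List.replicate (max 0 b * max 0 a).toNat v := by
  simp only [foldl_append_singleton, foldl_append_const, flatten_replicate_replicate,
    PySem.List.length_pyRange_one, List.nil_append, toNat_double, Int.sub_zero]

lemma triple_loop (v b a : Int) :
    (PySem.List.pyRange 0 b 1).foldl (fun r _ =>
      (PySem.List.pyRange 0 a 1).foldl (fun r _ =>
        (PySem.List.pyRange 0 (a ^ 2) 1).foldl (fun r _ => r ++ [v]) r) r) ([] : List Int)
    = List.replicate (max 0 b * max 0 a * a ^ 2).toNat v := by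
  simp only [foldl_append_singleton, foldl_append_const, flatten_replicate_replicate,
    PySem.List.length_pyRange_one, List.nil_append, toNat_triple, Int.sub_zero]

-- ===== VERDICT (by name: the statement is the Claim_ definition above) =====
theorem calculations_spec : Claim_equal_calculations := by
  intro a b c d _
  show calculations a b c d = calculations_alt a b c d
  unfold calculations calculations_alt
  split_ifs <;>
    first
      | exact triple_loop _ b a
      | exact double_loop _ b a
      | tauto
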